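-- pv_equiv track=rewrite | github.com/marian37/advent-of-code-2023 | 15.py | part1
-- ===== SOURCE A (Python) =====
-- def getHash(s):
--     h = 0
--     for c in s:
--         h += ord(c)
--         h *= 17
--         h %= 256
--     return h
--
-- def part1(input):
--     result = 0
--     for line in input:
--         sequence = line.split(",")
--         for s in sequence:
--             h = getHash(s)
--             result += h
--     return result
-- ===== SOURCE B (Python) =====
-- def tokenHash(tok):
--     # positional polynomial: each char contributes ord(c) * 17^(position from end + 1), mod 256
--     acc = 0
--     w = 17
--     for c in reversed(tok):
--         acc = (acc + ord(c) * w) % 256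
--         w = (w * 17) % 256
--     return acc
--
-- def part1(input):
--     return sum(tokenHash(tok) for line in input for tok in line.split(","))
-- ===== Notes on version B (the rewrite author's own statement) =====
-- stated objective: alternative
-- what changed: getHash's Horner-style fold ((h+ord(c))*17 % 256 per char) is replaced by an independent positional-weight sum over the reversed token (acc += ord(c)*17^(i+1) mod 256), and the nested accumulating loops of part1 are replaced by a single sum over a generator.
import Mathlib
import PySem

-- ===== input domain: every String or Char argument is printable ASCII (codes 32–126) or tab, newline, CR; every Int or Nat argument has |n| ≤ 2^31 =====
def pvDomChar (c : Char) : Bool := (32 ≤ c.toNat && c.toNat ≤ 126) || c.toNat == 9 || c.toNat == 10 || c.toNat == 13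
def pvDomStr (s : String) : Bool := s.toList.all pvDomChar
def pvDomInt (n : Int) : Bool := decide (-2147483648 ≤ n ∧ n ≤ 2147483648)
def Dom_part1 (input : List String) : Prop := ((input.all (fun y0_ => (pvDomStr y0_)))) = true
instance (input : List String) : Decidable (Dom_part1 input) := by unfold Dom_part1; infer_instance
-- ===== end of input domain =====

-- B replaces A's Horner-style rolling hash by a positional-weight sum over the reversed token
-- and the nested accumulating loops by one sum over a flattened token stream (alternative decomposition, same cost).


-- ===== PORT A =====
def getHash (s : List Char) : Int :=
  s.foldl (fun h c => PySem.Int.mod ((h + (c.toNat : Int)) * 17) 256) 0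

def part1 (input : List String) : Int :=
  input.foldl
    (fun result line =>
      (PySem.Chars.splitOn line.toList [',']).foldl (fun r s => r + getHash s) result)
    0

-- ===== PORT B =====
def tokenHash (tok : List Char) : Int :=
  (tok.reverse.foldl
    (fun (p : Int × Int) c =>
      (PySem.Int.mod (p.1 + (c.toNat : Int) * p.2) 256, PySem.Int.mod (p.2 * 17) 256))
    (0, 17)).1

def part1_alt (input : List String) : Int :=
  (input.flatMap (fun line => (PySem.Chars.splitOn line.toList [',']).map tokenHash)).sum

-- ===== PRECONDITION & SPEC =====
def Spec_part1 (input : List String) (out : Int) : Prop := out = part1_alt input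
instance (input : List String) (out : Int) : Decidable (Spec_part1 input out) := by unfold Spec_part1; infer_instance

-- ===== CLAIM (what is proved, stated in full; the proofs are below) =====
def Claim_equal_part1 : Prop := ∀ (input : List String), Dom_part1 input → Spec_part1 input (part1 input)

-- ===== LEMMAS AND PROOFS =====

-- the polynomial Σ cᵢ·17^i read off a (reversed) character list
def polyT : List Char → Int
  | [] => 0
  | c :: t => (c.toNat : Int) + 17 * polyT t

lemma polyT_append (r : List Char) (c : Char) :
    polyT (r ++ [c]) = polyT r + (c.toNat : Int) * 17 ^ r.length := by
  induction r with
  | nil => simp [polyT]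
  | cons d r ih => simp [polyT, ih]; ring

lemma emod_absorb_left (x y z : Int) : ((x % 256) * y + z) % 256 = (x * y + z) % 256 := by
  have h1 : x % 256 ≡ x [ZMOD 256] := Int.emod_emod_of_dvd x dvd_rfl
  exact (h1.mul_right y).add_right z

lemma emod_absorb_add (x y : Int) : ((x % 256) + y) % 256 = (x + y) % 256 := by
  have h1 : x % 256 ≡ x [ZMOD 256] := Int.emod_emod_of_dvd x dvd_rfl
  exact h1.add_right y

lemma emod_absorb_mid (x y z : Int) : (x + (y % 256) * z) % 256 = (x + y * z) % 256 := by
  have h1 : y % 256 ≡ y [ZMOD 256] := Int.emod_emod_of_dvd y dvd_rfl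
  exact (h1.mul_right z).add_left x

lemma getHash_closed (t : List Char) (c : Char) (h : Int) :
    (c :: t).foldl (fun h c => PySem.Int.mod ((h + (c.toNat : Int)) * 17) 256) h
      = (h * 17 ^ (c :: t).length + 17 * polyT (c :: t).reverse) % 256 := by
  induction t generalizing c h with
  | nil =>
    simp [polyT]
    ring_nf
  | cons d t ih =>
    rw [List.foldl_cons, ih]
    simp only [PySem.Int.mod_eq_emod_of_pos (by norm_num : (0:Int) < 256), List.reverse_cons,
      polyT_append, List.length_cons, List.length_reverse, List.length_append]
    rw [emod_absorb_left]
    ring_nf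
    simp

lemma tokenHash_closed (r : List Char) (c : Char) (acc w : Int) :
    ((c :: r).foldl
      (fun (p : Int × Int) c =>
        (PySem.Int.mod (p.1 + (c.toNat : Int) * p.2) 256, PySem.Int.mod (p.2 * 17) 256))
      (acc, w)).1 = (acc + w * polyT (c :: r)) % 256 := by
  induction r generalizing c acc w with
  | nil =>
    simp [polyT]
    ring_nf
  | cons d r ih =>
    rw [List.foldl_cons, ih]
    simp only [PySem.Int.mod_eq_emod_of_pos (by norm_num : (0:Int) < 256), polyT]
    rw [emod_absorb_mid, emod_absorb_add]
    ring_nf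

lemma getHash_eq_tokenHash (l : List Char) : getHash l = tokenHash l := by
  cases l with
  | nil => rfl
  | cons c t =>
    unfold getHash tokenHash
    rw [getHash_closed]
    obtain ⟨d, r, hr⟩ := List.exists_cons_of_ne_nil
      (by simp : (c :: t).reverse ≠ ([] : List Char))
    rw [hr, tokenHash_closed, ← hr]
    ring_nf

lemma sum_flatMap (l : List String) (f : String → List Int) :
    (l.flatMap f).sum = (l.map (fun a => (f a).sum)).sum := by
  induction l with
  | nil => rfl
  | cons a t ih => simp [List.flatMap_cons, ih]

lemma part1_eq (input : List String) :
    part1 input = part1_alt input := by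
  unfold part1 part1_alt
  rw [sum_flatMap]
  simp only [PySem.List.foldl_add, getHash_eq_tokenHash, zero_add]

-- ===== VERDICT (by name: the statement is the Claim_ definition above) =====
theorem part1_spec : Claim_equal_part1 := by
  intro input _
  unfold Spec_part1
  exact part1_eq input
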